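-- pv_equiv track=rewrite | github.com/GitSid-glitch/Competitive_Programming | E_Magical_Coins.py | can_pay_with_magical_coins
-- ===== SOURCE A (Python) =====
-- def can_pay_with_magical_coins(t, costs):
--     results = []
--     for n in costs:
--         # Check if there exists a valid combination of coins
--         found = False
--         # Try multiples of 111 coins (maximum is n // 111)
--         for k in range(min(n // 111, 11) + 1):
--             if (n - 111 * k) % 11 == 0:
--                 found = True
--                 break
--         results.append("YES" if found else "NO")
--     return results
-- ===== SOURCE B (Python) =====
-- def can_pay_with_magical_coins(t, costs):
--     # Closed form: 111 == 1 (mod 11), so a representation n = 111*k + 11*m exists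
--     # iff the residue n % 11 (the minimal k) fits within n // 111.
--     return ["YES" if n % 11 <= n // 111 else "NO" for n in costs]
-- ===== Notes on version B (the rewrite author's own statement) =====
-- stated objective: simpler
-- what changed: The inner search loop over k in range(min(n//111,11)+1) is replaced by the closed-form test n % 11 <= n // 111 (valid since 111 is congruent to 1 mod 11), leaving a single list comprehension.
import Mathlib
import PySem

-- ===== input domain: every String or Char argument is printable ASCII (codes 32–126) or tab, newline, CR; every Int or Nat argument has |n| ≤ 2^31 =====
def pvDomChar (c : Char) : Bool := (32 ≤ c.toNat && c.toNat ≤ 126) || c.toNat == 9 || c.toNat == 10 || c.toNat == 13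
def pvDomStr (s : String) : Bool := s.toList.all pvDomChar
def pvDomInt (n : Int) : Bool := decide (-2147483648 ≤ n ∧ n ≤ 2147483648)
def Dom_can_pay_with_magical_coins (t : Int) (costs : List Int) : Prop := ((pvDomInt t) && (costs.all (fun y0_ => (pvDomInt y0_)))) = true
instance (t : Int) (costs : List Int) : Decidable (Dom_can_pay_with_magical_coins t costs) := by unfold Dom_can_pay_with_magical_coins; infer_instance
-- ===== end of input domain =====

-- B replaces A's inner search loop by the closed-form test n % 11 <= n // 111 (simpler).

-- ===== PORT A =====
-- inner 'for k in range(...)' with break: returns found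
def pvInnerA (n : Int) : List Int → Bool
  | [] => false
  | k :: ks => if PySem.Int.mod (n - 111 * k) 11 = 0 then true else pvInnerA n ks

def can_pay_with_magical_coins (t : Int) (costs : List Int) : List String :=
  costs.foldl (fun results n =>
    results ++ [if pvInnerA n (PySem.List.pyRange 0 (min (PySem.Int.floordiv n 111) 11 + 1) 1) then "YES" else "NO"]) []

-- ===== PORT B =====
def can_pay_with_magical_coins_alt (t : Int) (costs : List Int) : List String :=
  costs.map (fun n => if PySem.Int.mod n 11 ≤ PySem.Int.floordiv n 111 then "YES" else "NO")

-- ===== PRECONDITION & SPEC =====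
def Spec_can_pay_with_magical_coins (t : Int) (costs : List Int) (out : List String) : Prop := out = can_pay_with_magical_coins_alt t costs
instance (t : Int) (costs : List Int) (out : List String) : Decidable (Spec_can_pay_with_magical_coins t costs out) := by unfold Spec_can_pay_with_magical_coins; infer_instance

-- ===== CLAIM (what is proved, stated in full; the proofs are below) =====
def Claim_equal_can_pay_with_magical_coins : Prop := ∀ (t : Int) (costs : List Int), Dom_can_pay_with_magical_coins t costs → Spec_can_pay_with_magical_coins t costs (can_pay_with_magical_coins t costs)

-- ===== LEMMAS AND PROOFS =====

-- the inner loop is an 'any' over the list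
theorem pvInnerA_eq_any (n : Int) (l : List Int) :
    pvInnerA n l = l.any (fun k => decide (PySem.Int.mod (n - 111 * k) 11 = 0)) := by
  induction l with
  | nil => rfl
  | cons k ks ih => by_cases h : PySem.Int.mod (n - 111 * k) 11 = 0 <;> simp [pvInnerA, h, ih]  -- covers both branches

-- per-element equivalence of inner loop and closed form
theorem pvInner_closed (n : Int) :
    pvInnerA n (PySem.List.pyRange 0 (min (PySem.Int.floordiv n 111) 11 + 1) 1) =
    decide (PySem.Int.mod n 11 ≤ PySem.Int.floordiv n 111) := by
  rw [pvInnerA_eq_any]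
  rw [PySem.Int.floordiv_eq_ediv_of_pos (a := n) (by norm_num),
      PySem.Int.mod_eq_emod_of_pos (a := n) (by norm_num)]
  by_cases h : n % 11 ≤ n / 111
  · simp only [h, decide_true, List.any_eq_true, PySem.List.mem_pyRange_one]
    refine ⟨n % 11, ⟨Int.emod_nonneg n (by norm_num), ?_⟩, ?_⟩
    · have h10 : n % 11 < 11 := Int.emod_lt_of_pos n (by norm_num)
      omega
    · rw [PySem.Int.mod_eq_emod_of_pos (by norm_num)]
      simp only [decide_eq_true_eq]
      omega
  · simp only [h, decide_false, List.any_eq_false]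
    intro k hk
    rw [PySem.List.mem_pyRange_one] at hk
    rw [PySem.Int.mod_eq_emod_of_pos (by norm_num)]
    simp only [decide_eq_true_eq]
    intro hz
    -- 11 ∣ n - 111*k, 0 ≤ k ≤ min(n/111,11); derive n % 11 ≤ n / 111
    have hmin : k ≤ min (n / 111) 11 := by omega
    have h111 : k ≤ n / 111 := by omega
    have h11 : k ≤ 11 := by omega
    have hk0 : 0 ≤ k := hk.1
    have hkm : (n - 111 * k) % 11 = 0 := hz
    have hmod : n % 11 = k % 11 := by omega
    rcases lt_or_ge k 11 with hklt | hkge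
    · have : n % 11 = k := by
        have := Int.emod_emod_of_dvd k (dvd_refl 11)
        omega
      omega
    · have hke : k = 11 := by omega
      have : n % 11 = 0 := by omega
      omega

theorem can_pay_foldl_eq_map (t : Int) (costs : List Int) :
    ∀ acc : List String,
      costs.foldl (fun results n =>
        results ++ [if pvInnerA n (PySem.List.pyRange 0 (min (PySem.Int.floordiv n 111) 11 + 1) 1) then "YES" else "NO"]) acc
      = acc ++ costs.map (fun n => if PySem.Int.mod n 11 ≤ PySem.Int.floordiv n 111 then "YES" else "NO") := by
  induction costs with
  | nil => intro acc; simp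
  | cons n ns ih =>
    intro acc
    rw [List.foldl_cons, ih, pvInner_closed, List.map_cons]
    by_cases h : PySem.Int.mod n 11 ≤ PySem.Int.floordiv n 111 <;> simp [h]

-- ===== VERDICT (by name: the statement is the Claim_ definition above) =====
theorem can_pay_with_magical_coins_spec : Claim_equal_can_pay_with_magical_coins := by
  intro t costs _
  show _ = _
  unfold can_pay_with_magical_coins can_pay_with_magical_coins_alt
  simpa using can_pay_foldl_eq_map t costs []
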